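-- pv_equiv track=rewrite | github.com/shreya-03/Sherlock | Code/UserBins.py | map_user_timestamp_bins
-- ===== SOURCE A (Python) =====
-- from math import floor
--
-- def map_user_timestamp_bins(imds):
-- 	user_bins = []
-- 	sorted_imds = sorted(imds)
-- 	bin_length = int(floor(len(imds)/5))
-- 	for imd in imds:
-- 		if imd >= sorted_imds[0] and imd <= sorted_imds[bin_length-1]:
-- 			user_bins.append(1)
-- 		elif imd >= sorted_imds[bin_length] and imd <= sorted_imds[2*bin_length-1]:
-- 			user_bins.append(2)
-- 		elif imd >= sorted_imds[2*bin_length] and imd <= sorted_imds[3*bin_length-1]: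
-- 			user_bins.append(3)
-- 		elif imd >= sorted_imds[3*bin_length] and imd <= sorted_imds[4*bin_length-1]:
-- 			user_bins.append(4)
-- 		else:
-- 			user_bins.append(5)
-- 	return user_bins
-- ===== SOURCE B (Python) =====
-- def map_user_timestamp_bins(imds):
--     n = len(imds)
--     b = n // 5
--     if b == 0:
--         return [1] * n
--     freq = {}
--     for x in imds:
--         freq[x] = freq.get(x, 0) + 1
--     rank = {}
--     acc = 0
--     for v in sorted(freq):
--         rank[v] = acc
--         acc += freq[v]
--     return [1 + min(4, rank[x] // b) for x in imds]
-- ===== Notes on version B (the rewrite author's own statement) =====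
-- stated objective: alternative
-- what changed: B never computes A's eight quantile boundary values or interval tests: it builds a frequency table, turns it into a strict-rank dictionary by a prefix-sum pass over the sorted distinct values, and classifies each element arithmetically as 1 + min(4, rank // bin_length).
import Mathlib
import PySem

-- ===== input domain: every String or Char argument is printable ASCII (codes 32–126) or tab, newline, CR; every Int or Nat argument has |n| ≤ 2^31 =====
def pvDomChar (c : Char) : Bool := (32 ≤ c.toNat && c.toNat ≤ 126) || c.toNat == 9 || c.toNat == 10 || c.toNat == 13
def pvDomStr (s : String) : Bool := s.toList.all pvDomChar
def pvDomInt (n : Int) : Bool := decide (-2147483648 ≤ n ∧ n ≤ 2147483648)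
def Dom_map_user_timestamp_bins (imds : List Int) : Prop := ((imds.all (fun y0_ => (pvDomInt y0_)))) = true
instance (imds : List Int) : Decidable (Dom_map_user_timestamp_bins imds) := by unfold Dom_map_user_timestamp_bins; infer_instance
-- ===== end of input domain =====

-- B replaces A's quantile-boundary interval chain by a frequency table and a
-- prefix-sum rank dictionary over the sorted distinct values, classifying each
-- element arithmetically from its strict rank; same result, different algorithm.

-- ===== PORT A =====
def map_user_timestamp_bins (imds : List Int) : List Int :=
  let s := PySem.List.sorted imds (fun x => x) false
  let bl : Int := PySem.Int.floordiv (imds.length : Int) 5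
  imds.foldl (fun acc imd =>
    if imd ≥ PySem.List.pyGetD s 0 0 ∧ imd ≤ PySem.List.pyGetD s (bl - 1) 0 then acc ++ [1]
    else if imd ≥ PySem.List.pyGetD s bl 0 ∧ imd ≤ PySem.List.pyGetD s (2*bl - 1) 0 then acc ++ [2]
    else if imd ≥ PySem.List.pyGetD s (2*bl) 0 ∧ imd ≤ PySem.List.pyGetD s (3*bl - 1) 0 then acc ++ [3]
    else if imd ≥ PySem.List.pyGetD s (3*bl) 0 ∧ imd ≤ PySem.List.pyGetD s (4*bl - 1) 0 then acc ++ [4]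
    else acc ++ [5]) []

-- ===== PORT B =====
def map_user_timestamp_bins_alt (imds : List Int) : List Int :=
  let n := imds.length
  let b := PySem.Int.floordiv (n : Int) 5
  if b = 0 then List.replicate n 1
  else
    let freq := imds.foldl (fun d x => d.insert x (d.getD x 0 + 1))
      (PySem.Dict.empty : PySem.Dict Int Int)
    let rank := (PySem.List.sorted freq.keys (fun v => v) false).foldl
      (fun (p : PySem.Dict Int Int × Int) v => (p.1.insert v p.2, p.2 + freq.getD v 0))
      ((PySem.Dict.empty : PySem.Dict Int Int), 0)
    imds.map (fun x => 1 + min 4 (PySem.Int.floordiv (rank.1.getD x 0) b))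

-- ===== PRECONDITION & SPEC =====
def Spec_map_user_timestamp_bins (imds : List Int) (out : List Int) : Prop := out = map_user_timestamp_bins_alt imds
instance (imds : List Int) (out : List Int) : Decidable (Spec_map_user_timestamp_bins imds out) := by unfold Spec_map_user_timestamp_bins; infer_instance

-- ===== CLAIM (what is proved, stated in full; the proofs are below) =====
def Claim_equal_map_user_timestamp_bins : Prop := ∀ (imds : List Int), Dom_map_user_timestamp_bins imds → Spec_map_user_timestamp_bins imds (map_user_timestamp_bins imds)

-- ===== LEMMAS AND PROOFS =====

-- the per-element bin A computes (proof-only helper)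
def binA (s : List Int) (bl : Int) (x : Int) : Int :=
  if x ≥ PySem.List.pyGetD s 0 0 ∧ x ≤ PySem.List.pyGetD s (bl - 1) 0 then 1
  else if x ≥ PySem.List.pyGetD s bl 0 ∧ x ≤ PySem.List.pyGetD s (2*bl - 1) 0 then 2
  else if x ≥ PySem.List.pyGetD s (2*bl) 0 ∧ x ≤ PySem.List.pyGetD s (3*bl - 1) 0 then 3
  else if x ≥ PySem.List.pyGetD s (3*bl) 0 ∧ x ≤ PySem.List.pyGetD s (4*bl - 1) 0 then 4
  else 5

theorem binA_push (s : List Int) (bl : Int) (acc : List Int) (x : Int) :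
    (if x ≥ PySem.List.pyGetD s 0 0 ∧ x ≤ PySem.List.pyGetD s (bl - 1) 0 then acc ++ [1]
     else if x ≥ PySem.List.pyGetD s bl 0 ∧ x ≤ PySem.List.pyGetD s (2*bl - 1) 0 then acc ++ [2]
     else if x ≥ PySem.List.pyGetD s (2*bl) 0 ∧ x ≤ PySem.List.pyGetD s (3*bl - 1) 0 then acc ++ [3]
     else if x ≥ PySem.List.pyGetD s (3*bl) 0 ∧ x ≤ PySem.List.pyGetD s (4*bl - 1) 0 then acc ++ [4]
     else acc ++ [5]) = acc ++ [binA s bl x] := by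
  unfold binA; split_ifs <;> rfl

theorem sortedD_mono (s : List Int) (hp : s.Pairwise (fun a b : Int => a ≤ b)) {i j : Nat}
    (hij : i ≤ j) (hj : j < s.length) : s.getD i 0 ≤ s.getD j 0 := by
  rcases lt_or_eq_of_le hij with h | rfl
  · rw [List.getD_eq_getElem _ _ (lt_trans h hj), List.getD_eq_getElem _ _ hj]
    exact List.pairwise_iff_getElem.mp hp i j (lt_trans h hj) hj h
  · rfl

-- K1: in a sorted list, the elements below x are exactly the first (countP (< x)) ones
theorem sorted_lt_iff_lt_countP (s : List Int) (hp : s.Pairwise (fun a b : Int => a ≤ b))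
    (x : Int) : ∀ i, i < s.length →
    (s.getD i 0 < x ↔ i < s.countP (fun y => decide (y < x))) := by
  induction s with
  | nil => intro i hi; simp at hi
  | cons a t ih =>
    rw [List.pairwise_cons] at hp
    intro i hi
    have hzero : ¬ a < x → t.countP (fun y => decide (y < x)) = 0 := by
      intro hax
      rw [List.countP_eq_zero]
      intro y hy
      simp only [decide_eq_true_eq]
      exact fun hyx => hax (lt_of_le_of_lt (hp.1 y hy) hyx)
    cases i with
    | zero =>
      simp only [List.getD_cons_zero, List.countP_cons]
      by_cases hax : a < x
      · simp [hax]
      · simp [hax, hzero hax]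
    | succ j =>
      simp only [List.getD_cons_succ, List.countP_cons]
      have hj : j < t.length := by simpa using hi
      by_cases hax : a < x
      · rw [ih hp.2 j hj]; simp [hax]
      · have hja : ¬ t.getD j 0 < x := by
          have : a ≤ t.getD j 0 := by
            rw [List.getD_eq_getElem _ _ hj]
            exact hp.1 _ (List.getElem_mem hj)
          exact fun h => hax (lt_of_le_of_lt this h)
        rw [hzero hax]
        exact iff_of_false hja (by simp [hax])

-- K2: anything at an index ≤ countP (< x) is ≤ x, provided x occurs in the list
theorem sorted_getD_le (s : List Int) (hp : s.Pairwise (fun a b : Int => a ≤ b))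
    {x : Int} (hx : x ∈ s) {i : Nat} (hi : i < s.length)
    (hc : i ≤ s.countP (fun y => decide (y < x))) : s.getD i 0 ≤ x := by
  obtain ⟨j, hj, hjx⟩ := List.mem_iff_getElem.mp hx
  have hjD : s.getD j 0 = x := by rw [List.getD_eq_getElem _ _ hj, hjx]
  have hjc : s.countP (fun y => decide (y < x)) ≤ j := by
    by_contra h
    have := (sorted_lt_iff_lt_countP s hp x j hj).mpr (by omega)
    rw [hjD] at this; exact lt_irrefl x this
  calc s.getD i 0 ≤ s.getD j 0 := sortedD_mono s hp (by omega) hj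
    _ = x := hjD

-- A's bin at x equals 1 + min 4 (rank / b), rank = number of elements of imds below x
theorem binA_eq_rank (imds : List Int) (x : Int) (hx : x ∈ imds)
    (hb : 1 ≤ imds.length / 5) :
    binA (PySem.List.sorted imds (fun x => x) false)
        ((imds.length / 5 : Nat) : Int) x
      = 1 + min 4 ((imds.countP (fun y => decide (y < x)) / (imds.length / 5) : Nat) : Int) := by
  have hperm := PySem.List.sorted_perm imds (fun x => x) false
  have hpair : (PySem.List.sorted imds (fun x => x) false).Pairwise (fun a b : Int => a ≤ b) :=
    PySem.List.sorted_pairwise imds (fun x => x)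
  set s := PySem.List.sorted imds (fun x => x) false with hs
  have hlen : s.length = imds.length := hperm.length_eq
  set n := imds.length with hn
  set b := n / 5 with hbdef
  set c := imds.countP (fun y => decide (y < x)) with hc
  have hcs : s.countP (fun y => decide (y < x)) = c := hperm.countP_eq _
  have h5 : b * 5 ≤ n := Nat.div_mul_le_self n 5
  have hxs : x ∈ s := hperm.mem_iff.mpr hx
  have hcle : c ≤ n := List.countP_le_length
  have hcn : c < n := by
    rcases lt_or_eq_of_le hcle with h | h
    · exact h
    · exfalso
      obtain ⟨j, hj, hjx⟩ := List.mem_iff_getElem.mp hxs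
      have := (sorted_lt_iff_lt_countP s hpair x j hj).mpr (by omega)
      rw [List.getD_eq_getElem _ _ hj, hjx] at this; exact lt_irrefl x this
  -- index arithmetic: all the indices A uses are in range
  have hlt : ∀ i, i < s.length → (s.getD i 0 < x ↔ i < c) := by
    intro i hi; rw [← hcs]; exact sorted_lt_iff_lt_countP s hpair x i hi
  have hle : ∀ i, i < s.length → i ≤ c → s.getD i 0 ≤ x := by
    intro i hi hic; exact sorted_getD_le s hpair hxs hi (by omega)
  unfold binA
  have e1 : ((b : Int) - 1) = ((b - 1 : Nat) : Int) := by omega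
  have e2 : (2 * (b : Int) - 1) = ((2 * b - 1 : Nat) : Int) := by omega
  have e3 : (3 * (b : Int) - 1) = ((3 * b - 1 : Nat) : Int) := by omega
  have e4 : (4 * (b : Int) - 1) = ((4 * b - 1 : Nat) : Int) := by omega
  have f1 : (2 * (b : Int)) = ((2 * b : Nat) : Int) := by omega
  have f2 : (3 * (b : Int)) = ((3 * b : Nat) : Int) := by omega
  rw [e1, e2, e3, e4, f1, f2]
  simp only [PySem.List.pyGetD_natCast, PySem.List.pyGetD_zero]
  by_cases hc1 : c < b
  · rw [if_pos ⟨hle 0 (by omega) (by omega),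
      le_of_not_gt (by rw [hlt (b-1) (by omega)]; omega)⟩]
    rw [Nat.div_eq_of_lt hc1]; simp
  · rw [if_neg (fun h => absurd ((hlt (b-1) (by omega)).mpr (by omega)) (not_lt.mpr h.2))]
    by_cases hc2 : c < 2 * b
    · rw [if_pos ⟨hle b (by omega) (by omega),
        le_of_not_gt (by rw [hlt (2*b-1) (by omega)]; omega)⟩]
      have hdiv : c / b = 1 := Nat.div_eq_of_lt_le (by omega) (by omega)
      rw [hdiv]; norm_num
    · rw [if_neg (fun h => absurd ((hlt (2*b-1) (by omega)).mpr (by omega)) (not_lt.mpr h.2))]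
      by_cases hc3 : c < 3 * b
      · rw [if_pos ⟨hle (2*b) (by omega) (by omega),
          le_of_not_gt (by rw [hlt (3*b-1) (by omega)]; omega)⟩]
        have hdiv : c / b = 2 := Nat.div_eq_of_lt_le (by omega) (by omega)
        rw [hdiv]; norm_num
      · rw [if_neg (fun h => absurd ((hlt (3*b-1) (by omega)).mpr (by omega)) (not_lt.mpr h.2))]
        by_cases hc4 : c < 4 * b
        · rw [if_pos ⟨hle (3*b) (by omega) (by omega),
            le_of_not_gt (by rw [hlt (4*b-1) (by omega)]; omega)⟩]
          have hdiv : c / b = 3 := Nat.div_eq_of_lt_le (by omega) (by omega)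
          rw [hdiv]; norm_num
        · rw [if_neg (fun h => absurd ((hlt (4*b-1) (by omega)).mpr (by omega)) (not_lt.mpr h.2))]
          have h4 : 4 ≤ c / b := (Nat.le_div_iff_mul_le (by omega)).mpr (by omega)
          have hmin : min 4 ((c / b : Nat) : Int) = 4 := by
            rw [min_eq_left]; exact_mod_cast Int.ofNat_le.mpr h4
          rw [hmin]; norm_num

-- B's rank fold leaves a key it never processes untouched
theorem rankFold_not_mem (ks : List Int) (cf : Int → Int) :
    ∀ (d : PySem.Dict Int Int) (a v : Int), v ∉ ks →
    ((ks.foldl (fun p w => (p.1.insert w p.2, p.2 + cf w)) (d, a)).1).getD v 0 = d.getD v 0 := by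
  induction ks with
  | nil => intro d a v _; rfl
  | cons k t ih =>
    intro d a v hv
    simp only [List.foldl_cons]
    rw [ih _ _ _ (fun h => hv (List.mem_cons_of_mem _ h)), PySem.Dict.getD_insert,
      if_neg (by rintro rfl; exact hv List.mem_cons_self)]

-- B's rank fold assigns each key the accumulated counts of the strictly smaller keys
theorem rankFold_getD (ks : List Int) (cf : Int → Int) :
    ∀ (d : PySem.Dict Int Int) (a : Int), ks.Pairwise (· < ·) → ∀ v ∈ ks,
    ((ks.foldl (fun p w => (p.1.insert w p.2, p.2 + cf w)) (d, a)).1).getD v 0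
      = a + ((ks.filter (fun w => decide (w < v))).map cf).sum := by
  induction ks with
  | nil => intro d a _ v hv; simp at hv
  | cons k t ih =>
    intro d a hp v hv
    rw [List.pairwise_cons] at hp
    simp only [List.foldl_cons]
    rcases List.mem_cons.mp hv with rfl | hvt
    · have hfilt : (v :: t).filter (fun w => decide (w < v)) = [] := by
        rw [List.filter_eq_nil_iff]
        intro w hw
        simp only [decide_eq_true_eq]
        rcases List.mem_cons.mp hw with rfl | hwt
        · exact lt_irrefl w
        · exact not_lt.mpr (le_of_lt (hp.1 w hwt))
      rw [hfilt, rankFold_not_mem t cf _ _ _ (fun h => absurd (hp.1 v h) (lt_irrefl v)),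
        PySem.Dict.getD_insert, if_pos rfl]
      simp
    · have hkv : k < v := hp.1 v hvt
      rw [List.filter_cons]
      simp only [hkv, decide_true, if_true, List.map_cons, List.sum_cons]
      rw [ih _ _ hp.2 v hvt]
      ring

-- a 0/1 indicator summed over a nodup list containing y collapses to one test
theorem delta_sum_zero (x y : Int) : ∀ ks : List Int, y ∉ ks →
    ((ks.filter (fun w => decide (w < x))).map (fun w => if w = y then (1:Int) else 0)).sum = 0 := by
  intro ks hy
  apply List.sum_eq_zero
  intro z hz
  obtain ⟨w, hw, rfl⟩ := List.mem_map.mp hz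
  rw [if_neg]
  intro h
  exact hy (h ▸ List.mem_of_mem_filter hw)

theorem delta_sum (x y : Int) : ∀ ks : List Int, ks.Nodup → y ∈ ks →
    ((ks.filter (fun w => decide (w < x))).map (fun w => if w = y then (1:Int) else 0)).sum
      = if y < x then 1 else 0 := by
  intro ks
  induction ks with
  | nil => intro _ h; simp at h
  | cons k t ih =>
    intro hnd hyk
    rw [List.nodup_cons] at hnd
    rcases List.mem_cons.mp hyk with rfl | hyt
    · by_cases hkx : y < x <;>
        simp [hkx, delta_sum_zero x y t hnd.1]
    · have hky : k ≠ y := fun h => hnd.1 (h ▸ hyt)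
      by_cases hkx : k < x <;>
        simp [hkx, hky, ih hnd.2 hyt]

-- partition counting: counting elements below x = summing the multiplicities of the
-- distinct values below x
theorem countP_eq_sum_counts (x : Int) :
    ∀ (l ks : List Int), ks.Nodup → (∀ y ∈ l, y ∈ ks) →
    ((ks.filter (fun w => decide (w < x))).map (fun w => (l.count w : Int))).sum
      = (l.countP (fun y => decide (y < x)) : Int) := by
  intro l
  induction l with
  | nil => intro ks _ _; simp
  | cons y l ih =>
    intro ks hnd hmem
    have hy : y ∈ ks := hmem y List.mem_cons_self
    have hml : ∀ z ∈ l, z ∈ ks := fun z hz => hmem z (List.mem_cons_of_mem _ hz)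
    have hcnt : ∀ w, ((y :: l).count w : Int)
        = (l.count w : Int) + (if w = y then 1 else 0) := by
      intro w
      rw [List.count_cons]
      by_cases h : w = y
      · subst h; simp
      · simp [h, Ne.symm h]
    have hsplit : ((ks.filter (fun w => decide (w < x))).map (fun w => ((y :: l).count w : Int))).sum
        = ((ks.filter (fun w => decide (w < x))).map (fun w => (l.count w : Int))).sum
          + ((ks.filter (fun w => decide (w < x))).map (fun w => if w = y then (1:Int) else 0)).sum := by
      rw [← PySem.List.sum_map_add_int]
      exact congrArg _ (List.map_congr_left (fun w _ => hcnt w))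
    rw [hsplit, ih ks hnd hml, delta_sum x y ks hnd hy, List.countP_cons]
    by_cases h : y < x <;> simp [h]

-- the last element of a sorted list bounds every member
theorem sortedD_le_last (s : List Int) (hp : s.Pairwise (fun a b : Int => a ≤ b)) {x : Int}
    (hx : x ∈ s) : x ≤ s.getD (s.length - 1) 0 := by
  obtain ⟨j, hj, rfl⟩ := List.mem_iff_getElem.mp hx
  have := sortedD_mono s hp (Nat.le_sub_one_of_lt hj) (by omega)
  rwa [List.getD_eq_getElem _ _ hj] at this

-- B's rank dictionary holds, at each x ∈ imds, the number of elements of imds below x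
theorem rank_getD_eq (imds : List Int) (x : Int) (hx : x ∈ imds) :
    (((PySem.List.sorted
        ((imds.foldl (fun d y => d.insert y (d.getD y 0 + 1))
          (PySem.Dict.empty : PySem.Dict Int Int)).keys) (fun v => v) false).foldl
      (fun (p : PySem.Dict Int Int × Int) v =>
        (p.1.insert v p.2, p.2 + (imds.foldl (fun d y => d.insert y (d.getD y 0 + 1))
          (PySem.Dict.empty : PySem.Dict Int Int)).getD v 0))
      ((PySem.Dict.empty : PySem.Dict Int Int), 0)).1).getD x 0
    = (imds.countP (fun y => decide (y < x)) : Int) := by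
  have hfreq : imds.foldl (fun d y => d.insert y (d.getD y 0 + 1))
      (PySem.Dict.empty : PySem.Dict Int Int) = PySem.Dict.counter imds :=
    PySem.Dict.foldl_insert_getD_add_one_eq_counter imds
  rw [hfreq, PySem.Dict.keys_counter]
  set ks := PySem.List.sorted (PySem.Set.ofList imds) (fun v => v) false with hks
  have hperm : ks.Perm (PySem.Set.ofList imds) := PySem.List.sorted_perm _ _ _
  have hnd : ks.Nodup := hperm.nodup_iff.mpr (PySem.Set.nodup_ofList imds)
  have hplt : ks.Pairwise (· < ·) := PySem.List.sorted_ofList_pairwise_lt imds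
  have hxk : x ∈ ks := hperm.mem_iff.mpr ((PySem.Set.mem_ofList _ _).mpr hx)
  rw [rankFold_getD ks (fun v => (PySem.Dict.counter imds).getD v 0) _ _ hplt x hxk]
  have hmapc : (ks.filter (fun w => decide (w < x))).map
        (fun v => (PySem.Dict.counter imds).getD v 0)
      = (ks.filter (fun w => decide (w < x))).map (fun w => (imds.count w : Int)) :=
    List.map_congr_left (fun w _ => PySem.Dict.getD_counter imds w)
  rw [hmapc, countP_eq_sum_counts x imds ks hnd
    (fun y hy => hperm.mem_iff.mpr ((PySem.Set.mem_ofList _ _).mpr hy))]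
  ring

theorem bins_eq (imds : List Int) :
    map_user_timestamp_bins imds = map_user_timestamp_bins_alt imds := by
  have hfd : PySem.Int.floordiv (imds.length : Int) 5 = ((imds.length / 5 : Nat) : Int) := by
    exact_mod_cast PySem.Int.floordiv_natCast imds.length 5
  have hperm := PySem.List.sorted_perm imds (fun x => x) false
  have hpair : (PySem.List.sorted imds (fun x => x) false).Pairwise (fun a b : Int => a ≤ b) :=
    PySem.List.sorted_pairwise imds (fun x => x)
  unfold map_user_timestamp_bins map_user_timestamp_bins_alt
  simp only [binA_push, PySem.List.foldl_append_singleton_eq_map, List.nil_append, hfd]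
  set s := PySem.List.sorted imds (fun x => x) false with hs
  have hlen : s.length = imds.length := hperm.length_eq
  by_cases hb0 : imds.length / 5 = 0
  · -- fewer than 5 elements: everything lands in bin 1 on both sides
    rw [hb0, if_pos (by norm_num)]
    rcases eq_or_ne imds [] with rfl | hne
    · rfl
    · have hsne : s ≠ [] := fun h => hne (List.eq_nil_of_length_eq_zero (by rw [← hlen, h]; rfl))
      have hpos : 0 < s.length := List.length_pos_iff.mpr hsne
      rw [List.eq_replicate_iff]
      refine ⟨by simp, ?_⟩
      intro z hz
      obtain ⟨x, hx, rfl⟩ := List.mem_map.mp hz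
      have hxs : x ∈ s := hperm.mem_iff.mpr hx
      unfold binA
      rw [if_pos]
      constructor
      · simpa [PySem.List.pyGetD_zero] using
          sorted_getD_le s hpair hxs hpos (Nat.zero_le _)
      · have he : ((0:Nat):Int) - 1 = -1 := by norm_num
        rw [he, PySem.List.pyGetD_neg_one s 0 hsne, List.getLast_eq_getElem]
        have := sortedD_le_last s hpair hxs
        rwa [List.getD_eq_getElem _ _ (by omega)] at this
  · -- at least 5 elements
    rw [if_neg (fun h => hb0 (by exact_mod_cast h))]
    apply List.map_congr_left
    intro x hx
    rw [rank_getD_eq imds x hx]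
    have hflo : PySem.Int.floordiv ((imds.countP (fun y => decide (y < x)) : Nat) : Int)
        (((imds.length / 5 : Nat)) : Int)
        = ((imds.countP (fun y => decide (y < x)) / (imds.length / 5) : Nat) : Int) := by
      exact_mod_cast PySem.Int.floordiv_natCast _ _
    rw [hflo]
    exact binA_eq_rank imds x hx (Nat.pos_of_ne_zero hb0)

-- ===== VERDICT (by name: the statement is the Claim_ definition above) =====
theorem map_user_timestamp_bins_spec : Claim_equal_map_user_timestamp_bins := by
  intro imds _
  unfold Spec_map_user_timestamp_bins
  exact bins_eq imds
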